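-- pv_equiv track=rewrite | github.com/CUKbab/CUK_Menu | pdf_menu_parser.py | parse_second_restaurant_menu
-- ===== SOURCE A (Python) =====
-- def parse_second_restaurant_menu(text):
--     """
--     Parses the cleaned text to allocate menu items to Morning, Lunch, and Dinner
--     for 5 days a week, ensuring Morning menus cycle every 4 times (Monday to Thursday)
--     and Lunch/Dinner menus cycle every 5 times (Monday to Friday).
--
--     Args:
--         text (str): The cleaned text extracted from the PDF.
--
--     Returns:
--         dict: A dictionary containing the parsed menu data, structured as follows:
--               {
--                   "Morning": {
--                       "월": ["item1", "item2", ...],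
--                       "화": [...],
--                       ...
--                   },
--                   "Lunch": { ... },
--                   "Dinner": { ... }
--               }
--     """
--     menu_data = {"Morning": {}, "Lunch": {}, "Dinner": {}}
--     days_of_week = ["Mon", "Tue", "Wed", "Thu", "Fri"]
--
--     # Initialize menu entries for each day and each meal
--     for meal in menu_data:
--         for day in days_of_week:
--             menu_data[meal][day] = []
--
--     # Combine all menu items into a single list
--     menu_items = " ".join(text.strip().split('\n')).split()
--
--     # Helper function to distribute menu items across meals and days
--     def distribute_menu_items(menu_items):
--         morning_day_index = 0  # Index for Morning (cycles every 4 days: Mon-Thu)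
--         lunch_day_index = 0  # Index for Lunch and Dinner (cycles every 5 days: Mon-Fri)
--         dinner_day_index = 0
--         current_meal = "Morning"  # Start with Morning
--
--         # Iterate through the menu items and distribute them
--         for i, item in enumerate(menu_items):
--             if current_meal == "Morning":
--                 morning_day_index = i % 4 # Cycle through 4 days (Mon-Thu)
--                 menu_data["Morning"][days_of_week[morning_day_index]].append(item)
--                 # Switch to Lunch after filling 24 Morning items
--                 if i == 23:  # 6 items * 4 days = 24 items
--                     current_meal = "Lunch"
--                 continue
--
--             if current_meal == "Lunch":
--                 i+=1
--                 # Fill Lunch menus (cycle every 5 days: Mon-Fri)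
--                 lunch_day_index = i % 5 # Cycle through 4 days (Mon-Thu)
--                 menu_data["Lunch"][days_of_week[lunch_day_index]].append(item)
--                 # Switch to Dinner after filling 30 Lunch items (6 items * 5 days)
--                 if i == 59: # 7 items * 5 days = 35 items
--                     current_meal = "Dinner"
--                 continue
--
--             if current_meal == "Dinner":
--                 i+=1
--                 dinner_day_index = i % 5 # Cycle through 5 days (Mon-Fri)
--                 menu_data["Dinner"][days_of_week[dinner_day_index]].append(item)
--
--     # Distribute menu items
--     distribute_menu_items(menu_items)
--
--     return menu_data
-- ===== SOURCE B (Python) =====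
-- def parse_second_restaurant_menu(text):
--     days_of_week = ["Mon", "Tue", "Wed", "Thu", "Fri"]
--     menu_items = " ".join(text.strip().split('\n')).split()
--     morning = menu_items[0:24]
--     lunch = menu_items[24:59]
--     dinner = menu_items[59:]
--
--     def spread(seg, cycle):
--         return {day: [x for p, x in enumerate(seg) if p % cycle == k]
--                 for k, day in enumerate(days_of_week)}
--
--     return {"Morning": spread(morning, 4),
--             "Lunch": spread(lunch, 5),
--             "Dinner": spread(dinner, 5)}
-- ===== Notes on version B (the rewrite author's own statement) =====
-- stated objective: simpler
-- what changed: Replaced A's stateful current_meal switching loop (with its in-loop i+=1 index shifting) by slicing the word list into three fixed segments (0:24, 24:59, 59:) and distributing each segment by plain position-mod-cycle comprehensions, with no mutable state machine.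
import Mathlib
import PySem

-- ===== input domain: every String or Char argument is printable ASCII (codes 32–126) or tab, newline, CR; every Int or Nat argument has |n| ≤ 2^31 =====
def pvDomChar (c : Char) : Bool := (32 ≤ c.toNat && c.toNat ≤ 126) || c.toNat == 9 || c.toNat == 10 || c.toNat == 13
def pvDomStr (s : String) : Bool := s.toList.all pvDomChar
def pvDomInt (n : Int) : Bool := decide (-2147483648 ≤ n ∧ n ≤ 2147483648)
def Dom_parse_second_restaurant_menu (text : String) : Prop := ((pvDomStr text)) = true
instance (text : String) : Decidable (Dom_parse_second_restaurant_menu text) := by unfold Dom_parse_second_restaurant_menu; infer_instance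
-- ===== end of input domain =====

-- B replaces A's stateful current_meal loop by three fixed slices distributed with plain modular indexing (simpler decomposition).

-- ===== PORT A =====
-- helper: the loop body of A's inner 'distribute_menu_items' (one enumerate step; state = (menu_data, current_meal))
def pvStepA (st : PySem.Dict String (PySem.Dict String (List String)) × String)
    (p : Int × String) : PySem.Dict String (PySem.Dict String (List String)) × String :=
  let days_of_week : List String := ["Mon", "Tue", "Wed", "Thu", "Fri"]
  let md := st.1
  let current_meal := st.2
  let i := p.1
  let item := p.2
  if current_meal == "Morning" then
    let morning_day_index := PySem.Int.mod i 4
    let day := (PySem.List.pyGet? days_of_week morning_day_index).getD ""   -- index is 0..3, always in range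
    let md := md.modify "Morning" PySem.Dict.empty (fun inner => inner.modify day [] (fun l => l ++ [item]))
    (md, if i == 23 then "Lunch" else current_meal)
  else if current_meal == "Lunch" then
    let i := i + 1
    let lunch_day_index := PySem.Int.mod i 5
    let day := (PySem.List.pyGet? days_of_week lunch_day_index).getD ""     -- index is 0..4, always in range
    let md := md.modify "Lunch" PySem.Dict.empty (fun inner => inner.modify day [] (fun l => l ++ [item]))
    (md, if i == 59 then "Dinner" else current_meal)
  else if current_meal == "Dinner" then
    let i := i + 1
    let dinner_day_index := PySem.Int.mod i 5
    let day := (PySem.List.pyGet? days_of_week dinner_day_index).getD ""    -- index is 0..4, always in range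
    let md := md.modify "Dinner" PySem.Dict.empty (fun inner => inner.modify day [] (fun l => l ++ [item]))
    (md, current_meal)
  else (md, current_meal)

def parse_second_restaurant_menu (text : String) : List (String × List (String × List String)) :=
  let menu_data0 : PySem.Dict String (PySem.Dict String (List String)) :=
    PySem.Dict.ofList [("Morning", PySem.Dict.empty), ("Lunch", PySem.Dict.empty), ("Dinner", PySem.Dict.empty)]
  let days_of_week : List String := ["Mon", "Tue", "Wed", "Thu", "Fri"]
  -- initialize menu entries for each day and each meal
  let menu_data := menu_data0.keys.foldl (fun md meal =>
      days_of_week.foldl (fun md day =>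
        md.modify meal PySem.Dict.empty (fun inner => inner.insert day [])) md) menu_data0
  let menu_items := PySem.Str.split₀ (PySem.Str.join " " ((PySem.Str.split? (PySem.Str.strip text) "\n").getD []))
  -- distribute_menu_items
  let menu_data := ((PySem.List.enumerate menu_items 0).foldl pvStepA (menu_data, "Morning")).1
  menu_data.items.map (fun p => (p.1, p.2.items))

-- ===== PORT B =====
-- helper: B's 'spread' — dict comprehension {day: [x for p, x in enumerate(seg) if p % cycle == k] for k, day in enumerate(days)}
def pvSpread (seg : List String) (cycle : Int) : List (String × List String) :=
  (PySem.List.enumerate ["Mon", "Tue", "Wed", "Thu", "Fri"] 0).map (fun kd =>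
    (kd.2, (PySem.List.enumerate seg 0).filterMap (fun px =>
      if PySem.Int.mod px.1 cycle == kd.1 then some px.2 else none)))

def parse_second_restaurant_menu_alt (text : String) : List (String × List (String × List String)) :=
  let menu_items := PySem.Str.split₀ (PySem.Str.join " " ((PySem.Str.split? (PySem.Str.strip text) "\n").getD []))
  let morning := PySem.List.slice menu_items (some 0) (some 24)
  let lunch := PySem.List.slice menu_items (some 24) (some 59)
  let dinner := PySem.List.slice menu_items (some 59) none
  [("Morning", pvSpread morning 4), ("Lunch", pvSpread lunch 5), ("Dinner", pvSpread dinner 5)]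

-- ===== PRECONDITION & SPEC =====
def Spec_parse_second_restaurant_menu (text : String) (out : List (String × List (String × List String))) : Prop := out = parse_second_restaurant_menu_alt text
instance (text : String) (out : List (String × List (String × List String))) : Decidable (Spec_parse_second_restaurant_menu text out) := by unfold Spec_parse_second_restaurant_menu; infer_instance

-- ===== CLAIM (what is proved, stated in full; the proofs are below) =====
def Claim_equal_parse_second_restaurant_menu : Prop := ∀ (text : String), Dom_parse_second_restaurant_menu text → Spec_parse_second_restaurant_menu text (parse_second_restaurant_menu text)

-- ===== LEMMAS AND PROOFS =====
-- proof-side: meal / bucket of an absolute item position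
def pvMealOf (n : Nat) : String := if n < 24 then "Morning" else if n < 59 then "Lunch" else "Dinner"
def pvBM (n : Nat) : Nat := if n < 24 then 0 else if n < 59 then 1 else 2
def pvBD (n : Nat) : Nat := if n < 24 then n % 4 else (n + 1) % 5

def pvUpd (f : Nat → Nat → List String) (m d : Nat) (x : String) : Nat → Nat → List String :=
  fun m' d' => if m' = m ∧ d' = d then f m' d' ++ [x] else f m' d'

def pvMkMD (f : Nat → Nat → List String) : PySem.Dict String (PySem.Dict String (List String)) :=
  PySem.Dict.mk [("Morning", PySem.Dict.mk [("Mon", f 0 0), ("Tue", f 0 1), ("Wed", f 0 2), ("Thu", f 0 3), ("Fri", f 0 4)]),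
                 ("Lunch",   PySem.Dict.mk [("Mon", f 1 0), ("Tue", f 1 1), ("Wed", f 1 2), ("Thu", f 1 3), ("Fri", f 1 4)]),
                 ("Dinner",  PySem.Dict.mk [("Mon", f 2 0), ("Tue", f 2 1), ("Wed", f 2 2), ("Thu", f 2 3), ("Fri", f 2 4)])]

def pvFacc : Nat → (Nat → Nat → List String) → List String → (Nat → Nat → List String)
  | _, f, [] => f
  | n, f, x :: xs => pvFacc (n + 1) (pvUpd f (pvBM n) (pvBD n) x) xs

def pvCollect : Nat → Nat → Nat → List String → List String
  | _, _, _, [] => []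
  | n, m, d, x :: xs => (if pvBM n = m ∧ pvBD n = d then [x] else []) ++ pvCollect (n + 1) m d xs

def pvMealName (m : Nat) : String := ["Morning", "Lunch", "Dinner"].getD m ""
def pvDayName (d : Nat) : String := ["Mon", "Tue", "Wed", "Thu", "Fri"].getD d ""

theorem pvModify_mkMD (f : Nat → Nat → List String) (m d : Nat) (hm : m < 3) (hd : d < 5) (x : String) :
    (pvMkMD f).modify (pvMealName m) PySem.Dict.empty
        (fun inner => inner.modify (pvDayName d) [] (fun l => l ++ [x]))
      = pvMkMD (pvUpd f m d x) := by
  interval_cases m <;> interval_cases d <;> rfl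
theorem pvDay_get (c : Nat) (hc : c < 5) :
    (PySem.List.pyGet? ["Mon", "Tue", "Wed", "Thu", "Fri"] ((c : Nat) : Int)).getD "" = pvDayName c := by
  interval_cases c <;> rfl

theorem pvStepA_eq (f : Nat → Nat → List String) (n : Nat) (x : String) :
    pvStepA (pvMkMD f, pvMealOf n) ((n : Int), x)
      = (pvMkMD (pvUpd f (pvBM n) (pvBD n) x), pvMealOf (n + 1)) := by
  have hm4 : PySem.Int.mod ((n : Nat) : Int) 4 = (((n % 4 : Nat)) : Int) := by
    exact_mod_cast PySem.Int.mod_natCast n 4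
  have hm5 : PySem.Int.mod (((n : Nat) : Int) + 1) 5 = ((((n + 1) % 5 : Nat)) : Int) := by
    have h := PySem.Int.mod_natCast (n + 1) 5
    rw [← h]; norm_num
  rcases show n < 24 ∨ (24 ≤ n ∧ n < 59) ∨ 59 ≤ n by omega with h | ⟨h, h'⟩ | h
  · have hmeal : pvMealOf n = "Morning" := by simp [pvMealOf, h]
    have hbm : pvBM n = 0 := by simp [pvBM, h]
    have hbd : pvBD n = n % 4 := by simp [pvBD, h]
    simp only [pvStepA, hmeal, hbm, hbd]
    rw [if_pos (by decide)]
    rw [hm4, pvDay_get (n % 4) (by omega), show ("Morning" : String) = pvMealName 0 from rfl,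
      pvModify_mkMD f 0 (n % 4) (by omega) (by omega) x]
    simp only [Prod.mk.injEq, true_and]
    by_cases h23 : n = 23
    · subst h23; rw [if_pos (by decide)]; rfl
    · have hb : (((n : Nat) : Int) == 23) = false := by
        simp only [beq_eq_false_iff_ne]; omega
      rw [hb]; simp only [Bool.false_eq_true, if_false]
      unfold pvMealOf; rw [if_pos (by omega)]; rfl
  · have hmeal : pvMealOf n = "Lunch" := by unfold pvMealOf; rw [if_neg (by omega), if_pos (by omega)]
    have hbm : pvBM n = 1 := by unfold pvBM; rw [if_neg (by omega), if_pos (by omega)]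
    have hbd : pvBD n = (n + 1) % 5 := by unfold pvBD; rw [if_neg (by omega)]
    simp only [pvStepA, hmeal, hbm, hbd]
    rw [if_neg (by decide), if_pos (by decide)]
    rw [hm5, pvDay_get ((n + 1) % 5) (by omega), show ("Lunch" : String) = pvMealName 1 from rfl,
      pvModify_mkMD f 1 ((n + 1) % 5) (by omega) (by omega) x]
    simp only [Prod.mk.injEq, true_and]
    by_cases h58 : n = 58
    · subst h58; rw [if_pos (by decide)]; rfl
    · have hb : (((n : Nat) : Int) + 1 == 59) = false := by
        simp only [beq_eq_false_iff_ne]; omega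
      rw [hb]; simp only [Bool.false_eq_true, if_false]
      unfold pvMealOf; rw [if_neg (by omega), if_pos (by omega)]; rfl
  · have hmeal : pvMealOf n = "Dinner" := by unfold pvMealOf; rw [if_neg (by omega), if_neg (by omega)]
    have hbm : pvBM n = 2 := by unfold pvBM; rw [if_neg (by omega), if_neg (by omega)]
    have hbd : pvBD n = (n + 1) % 5 := by unfold pvBD; rw [if_neg (by omega)]
    simp only [pvStepA, hmeal, hbm, hbd]
    rw [if_neg (by decide), if_neg (by decide), if_pos (by decide)]
    rw [hm5, pvDay_get ((n + 1) % 5) (by omega), show ("Dinner" : String) = pvMealName 2 from rfl,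
      pvModify_mkMD f 2 ((n + 1) % 5) (by omega) (by omega) x]
    simp only [Prod.mk.injEq, true_and]
    unfold pvMealOf; rw [if_neg (by omega), if_neg (by omega)]; rfl
theorem pvLoop_eq (items : List String) : ∀ (n : Nat) (f : Nat → Nat → List String),
    (PySem.List.enumerate items (n : Int)).foldl pvStepA (pvMkMD f, pvMealOf n)
      = (pvMkMD (pvFacc n f items), pvMealOf (n + items.length)) := by
  induction items with
  | nil => intro n f; simp [PySem.List.enumerate_nil, pvFacc]
  | cons x xs ih =>
    intro n f
    rw [PySem.List.enumerate_cons, List.foldl_cons, pvStepA_eq]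
    have hc : ((n : Nat) : Int) + 1 = (((n + 1 : Nat)) : Int) := by push_cast; ring
    rw [hc, ih (n + 1)]
    have h1 : pvFacc (n + 1) (pvUpd f (pvBM n) (pvBD n) x) xs = pvFacc n f (x :: xs) := rfl
    rw [h1, show n + 1 + xs.length = n + (x :: xs).length from by simp only [List.length_cons]; omega]

theorem pvFacc_eq (items : List String) : ∀ (n : Nat) (f : Nat → Nat → List String) (m d : Nat),
    pvFacc n f items m d = f m d ++ pvCollect n m d items := by
  induction items with
  | nil => intro n f m d; simp [pvFacc, pvCollect]
  | cons x xs ih =>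
    intro n f m d
    rw [show pvFacc n f (x :: xs) = pvFacc (n + 1) (pvUpd f (pvBM n) (pvBD n) x) xs from rfl,
      ih (n + 1)]
    by_cases h : pvBM n = m ∧ pvBD n = d
    · simp [pvCollect, pvUpd, h.1, h.2]
    · have h' : ¬ (m = pvBM n ∧ d = pvBD n) := by tauto
      simp [pvCollect, pvUpd, h, h']

theorem pvCollect_append (m d : Nat) (xs ys : List String) : ∀ (n : Nat),
    pvCollect n m d (xs ++ ys) = pvCollect n m d xs ++ pvCollect (n + xs.length) m d ys := by
  induction xs with
  | nil => intro n; simp [pvCollect]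
  | cons x xs ih =>
    intro n
    rw [List.cons_append, show pvCollect n m d (x :: (xs ++ ys))
        = (if pvBM n = m ∧ pvBD n = d then [x] else []) ++ pvCollect (n + 1) m d (xs ++ ys) from rfl,
      ih (n + 1),
      show pvCollect n m d (x :: xs)
        = (if pvBM n = m ∧ pvBD n = d then [x] else []) ++ pvCollect (n + 1) m d xs from rfl]
    simp only [List.length_cons]
    rw [show n + (xs.length + 1) = n + 1 + xs.length from by omega, List.append_assoc]

theorem pvCollect_dead (m d : Nat) (xs : List String) : ∀ (n : Nat),
    (∀ k, n ≤ k → k < n + xs.length → pvBM k ≠ m) → pvCollect n m d xs = [] := by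
  induction xs with
  | nil => intro n _; rfl
  | cons x xs ih =>
    intro n h
    have hh : pvBM n ≠ m := h n (le_refl n) (by simp only [List.length_cons]; omega)
    rw [show pvCollect n m d (x :: xs)
      = (if pvBM n = m ∧ pvBD n = d then [x] else []) ++ pvCollect (n + 1) m d xs from rfl]
    rw [if_neg (by tauto), ih (n + 1) (by intro k h1 h2; exact h k (by omega) (by simp only [List.length_cons]; omega))]
    rfl

theorem pvEnum_shift {α : Type} (xs : List α) : ∀ (s : Int),
    PySem.List.enumerate xs s = (PySem.List.enumerate xs 0).map (fun p => (p.1 + s, p.2)) := by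
  induction xs with
  | nil => intro s; simp [PySem.List.enumerate_nil]
  | cons x xs ih =>
    intro s
    rw [PySem.List.enumerate_cons, PySem.List.enumerate_cons, ih (s + 1),
      show (0 : Int) + 1 = 1 from by norm_num, ih 1, List.map_cons, List.map_map]
    simp only [List.cons.injEq, Prod.mk.injEq, and_true]
    refine ⟨by ring, ?_⟩
    apply List.map_congr_left; intro p _; simp; ring

theorem pvCollect_m0 (d : Nat) (xs : List String) : ∀ (n : Nat), n + xs.length ≤ 24 →
    pvCollect n 0 d xs = (PySem.List.enumerate xs (n : Int)).filterMap
      (fun px => if PySem.Int.mod px.1 4 == (d : Int) then some px.2 else none) := by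
  induction xs with
  | nil => intro n _; rfl
  | cons x xs ih =>
    intro n hn
    have h24 : n < 24 := by simp at hn; omega
    have hm4 : PySem.Int.mod ((n : Nat) : Int) 4 = (((n % 4 : Nat)) : Int) := by
      exact_mod_cast PySem.Int.mod_natCast n 4
    have hbm : pvBM n = 0 := by unfold pvBM; rw [if_pos h24]
    have hbd : pvBD n = n % 4 := by unfold pvBD; rw [if_pos h24]
    rw [PySem.List.enumerate_cons, List.filterMap_cons,
      show pvCollect n 0 d (x :: xs)
        = (if pvBM n = 0 ∧ pvBD n = d then [x] else []) ++ pvCollect (n + 1) 0 d xs from rfl,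
      hbm, hbd]
    have hc : ((n : Nat) : Int) + 1 = (((n + 1 : Nat)) : Int) := by push_cast; ring
    rw [hc, ← ih (n + 1) (by simp at hn ⊢; omega)]
    simp only [hm4]
    by_cases h : n % 4 = d
    · rw [← h]; simp
    · simp [h]
      rw [if_neg (by omega)]

theorem pvCollect_m1 (d : Nat) (xs : List String) : ∀ (n : Nat), 24 ≤ n → n + xs.length ≤ 59 →
    pvCollect n 1 d xs = (PySem.List.enumerate xs (n : Int)).filterMap
      (fun px => if PySem.Int.mod (px.1 + 1) 5 == (d : Int) then some px.2 else none) := by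
  induction xs with
  | nil => intro n _ _; rfl
  | cons x xs ih =>
    intro n hn hn'
    have h59 : n < 59 := by simp at hn'; omega
    have hm5 : PySem.Int.mod (((n : Nat) : Int) + 1) 5 = ((((n + 1) % 5 : Nat)) : Int) := by
      have h := PySem.Int.mod_natCast (n + 1) 5
      rw [← h]; norm_num
    have hbm : pvBM n = 1 := by unfold pvBM; rw [if_neg (by omega), if_pos h59]
    have hbd : pvBD n = (n + 1) % 5 := by unfold pvBD; rw [if_neg (by omega)]
    rw [PySem.List.enumerate_cons, List.filterMap_cons,
      show pvCollect n 1 d (x :: xs)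
        = (if pvBM n = 1 ∧ pvBD n = d then [x] else []) ++ pvCollect (n + 1) 1 d xs from rfl,
      hbm, hbd]
    have hc : ((n : Nat) : Int) + 1 = (((n + 1 : Nat)) : Int) := by push_cast; ring
    rw [hc, ← ih (n + 1) (by omega) (by simp at hn' ⊢; omega)]

    by_cases h : (n + 1) % 5 = d
    · rw [← h]; simp
    · simp [h]
      rw [if_neg (by omega)]

theorem pvCollect_m2 (d : Nat) (xs : List String) : ∀ (n : Nat), 59 ≤ n →
    pvCollect n 2 d xs = (PySem.List.enumerate xs (n : Int)).filterMap
      (fun px => if PySem.Int.mod (px.1 + 1) 5 == (d : Int) then some px.2 else none) := by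
  induction xs with
  | nil => intro n _; rfl
  | cons x xs ih =>
    intro n hn
    have hm5 : PySem.Int.mod (((n : Nat) : Int) + 1) 5 = ((((n + 1) % 5 : Nat)) : Int) := by
      have h := PySem.Int.mod_natCast (n + 1) 5
      rw [← h]; norm_num
    have hbm : pvBM n = 2 := by unfold pvBM; rw [if_neg (by omega), if_neg (by omega)]
    have hbd : pvBD n = (n + 1) % 5 := by unfold pvBD; rw [if_neg (by omega)]
    rw [PySem.List.enumerate_cons, List.filterMap_cons,
      show pvCollect n 2 d (x :: xs)
        = (if pvBM n = 2 ∧ pvBD n = d then [x] else []) ++ pvCollect (n + 1) 2 d xs from rfl,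
      hbm, hbd]
    have hc : ((n : Nat) : Int) + 1 = (((n + 1 : Nat)) : Int) := by push_cast; ring
    rw [hc, ← ih (n + 1) (by omega)]

    by_cases h : (n + 1) % 5 = d
    · rw [← h]; simp
    · simp [h]
      rw [if_neg (by omega)]
theorem pvRow_morning (d : Nat) (items : List String) :
    pvCollect 0 0 d items = (PySem.List.enumerate (items.take 24) 0).filterMap
      (fun px => if PySem.Int.mod px.1 4 == (d : Int) then some px.2 else none) := by
  have hdec : items = items.take 24 ++ items.drop 24 := (List.take_append_drop 24 items).symm
  conv_lhs => rw [hdec]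
  rw [pvCollect_append]
  simp only [Nat.zero_add]
  rw [pvCollect_m0 d (items.take 24) 0 (by simp only [Nat.zero_add, List.length_take]; omega),
    pvCollect_dead 0 d (items.drop 24) ((items.take 24).length) (by
      intro k h1 h2
      simp only [List.length_take, List.length_drop] at h1 h2
      unfold pvBM
      split_ifs <;> omega)]
  norm_num

theorem pvShiftCond (c0 : Int) (hc : PySem.Int.mod (c0 + 1) 5 = 0) (seg : List String) (d : Nat) :
    (PySem.List.enumerate seg c0).filterMap
        (fun px => if PySem.Int.mod (px.1 + 1) 5 == (d : Int) then some px.2 else none)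
      = (PySem.List.enumerate seg 0).filterMap
        (fun px => if PySem.Int.mod px.1 5 == (d : Int) then some px.2 else none) := by
  rw [pvEnum_shift seg c0, List.filterMap_map]
  congr 1
  funext p
  have h5 : (0 : Int) < 5 := by norm_num
  have hc' : (c0 + 1) % 5 = 0 := by rw [← PySem.Int.mod_eq_emod_of_pos h5]; exact hc
  have e1 : PySem.Int.mod (p.1 + c0 + 1) 5 = PySem.Int.mod p.1 5 := by
    rw [PySem.Int.mod_eq_emod_of_pos h5, PySem.Int.mod_eq_emod_of_pos h5]
    omega
  simp only [Function.comp_apply, e1]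

theorem pvRow_lunch (d : Nat) (items : List String) :
    pvCollect 0 1 d items = (PySem.List.enumerate ((items.drop 24).take 35) 0).filterMap
      (fun px => if PySem.Int.mod px.1 5 == (d : Int) then some px.2 else none) := by
  have hdec : items = items.take 24 ++ ((items.drop 24).take 35 ++ (items.drop 24).drop 35) := by
    rw [List.take_append_drop, List.take_append_drop]
  conv_lhs => rw [hdec]
  rw [pvCollect_append, pvCollect_append]
  simp only [Nat.zero_add]
  rw [pvCollect_dead 1 d (items.take 24) 0 (by
    intro k h1 h2
    simp only [Nat.zero_add, List.length_take] at h2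
    unfold pvBM; split_ifs <;> omega)]
  by_cases hlen : 24 ≤ items.length
  · have ht : (items.take 24).length = 24 := by simp only [List.length_take]; omega
    rw [ht, pvCollect_m1 d _ 24 (le_refl 24) (by simp only [List.length_take]; omega),
      pvCollect_dead 1 d ((items.drop 24).drop 35) (24 + ((items.drop 24).take 35).length) (by
        intro k h1 h2
        simp only [List.length_take, List.length_drop] at h1 h2
        unfold pvBM; split_ifs <;> omega),
      show ((24 : Nat) : Int) = (24 : Int) from by norm_num, pvShiftCond 24 (by decide)]
    simp
  · have hdrop : items.drop 24 = [] := by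
      apply List.drop_eq_nil_of_le; omega
    rw [hdrop]
    simp [pvCollect, PySem.List.enumerate_nil]

theorem pvRow_dinner (d : Nat) (items : List String) :
    pvCollect 0 2 d items = (PySem.List.enumerate (items.drop 59) 0).filterMap
      (fun px => if PySem.Int.mod px.1 5 == (d : Int) then some px.2 else none) := by
  have hdec : items = items.take 24 ++ ((items.drop 24).take 35 ++ (items.drop 24).drop 35) := by
    rw [List.take_append_drop, List.take_append_drop]
  have hdd : (items.drop 24).drop 35 = items.drop 59 := by
    rw [List.drop_drop]
  conv_lhs => rw [hdec]
  rw [pvCollect_append, pvCollect_append]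
  simp only [Nat.zero_add]
  rw [pvCollect_dead 2 d (items.take 24) 0 (by
    intro k h1 h2
    simp only [Nat.zero_add, List.length_take] at h2
    unfold pvBM; split_ifs <;> omega)]
  rw [pvCollect_dead 2 d ((items.drop 24).take 35) ((items.take 24).length) (by
    intro k h1 h2
    simp only [List.length_take, List.length_drop] at h1 h2
    unfold pvBM; split_ifs <;> omega)]
  by_cases hlen : 59 ≤ items.length
  · have ht : (items.take 24).length = 24 := by simp only [List.length_take]; omega
    have hm : ((items.drop 24).take 35).length = 35 := by
      simp only [List.length_take, List.length_drop]; omega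
    rw [ht, hm, hdd, pvCollect_m2 d _ 59 (le_refl 59), show ((59 : Nat) : Int) = (59 : Int) from by norm_num, pvShiftCond 59 (by decide)]
    simp
  · have hdrop : items.drop 59 = [] := by
      apply List.drop_eq_nil_of_le; omega
    rw [hdd, hdrop]
    simp [pvCollect, PySem.List.enumerate_nil]
theorem pvSlice1 (items : List String) :
    PySem.List.slice items (some 0) (some 24) = items.take 24 := by
  rw [PySem.List.slice_toNat items (by norm_num) (by norm_num)]
  simp

theorem pvSlice2 (items : List String) :
    PySem.List.slice items (some 24) (some 59) = (items.drop 24).take 35 := by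
  rw [PySem.List.slice_toNat items (by norm_num) (by norm_num)]
  simp

theorem pvSlice3 (items : List String) :
    PySem.List.slice items (some 59) none = items.drop 59 := by
  rw [PySem.List.slice_from items (by norm_num)]
  simp

theorem pvMain (items : List String) :
    ((PySem.List.enumerate items 0).foldl pvStepA
        (pvMkMD (fun _ _ => []), "Morning")).1.items.map (fun p => (p.1, p.2.items))
      = [("Morning", pvSpread (PySem.List.slice items (some 0) (some 24)) 4),
         ("Lunch", pvSpread (PySem.List.slice items (some 24) (some 59)) 5),
         ("Dinner", pvSpread (PySem.List.slice items (some 59) none) 5)] := by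
  have hload := pvLoop_eq items 0 (fun _ _ => [])
  rw [show ((0 : Nat) : Int) = (0 : Int) from rfl, show pvMealOf 0 = "Morning" from rfl] at hload
  rw [hload, pvSlice1, pvSlice2, pvSlice3]
  have hf := pvFacc_eq items 0 (fun _ _ => [])
  simp only [pvMkMD, pvSpread]
  simp only [PySem.List.enumerate_cons, PySem.List.enumerate_nil, List.map_cons, List.map_nil]
  simp only [List.cons.injEq, Prod.mk.injEq, true_and, and_true]
  and_intros <;>
    rw [hf] <;>
    simp only [List.nil_append] <;>
    first
      | (rw [pvRow_morning]; norm_num)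
      | (rw [pvRow_lunch]; norm_num)
      | (rw [pvRow_dinner]; norm_num)

-- ===== VERDICT (by name: the statement is the Claim_ definition above) =====
theorem parse_second_restaurant_menu_spec : Claim_equal_parse_second_restaurant_menu := by
  intro text _
  unfold Spec_parse_second_restaurant_menu parse_second_restaurant_menu parse_second_restaurant_menu_alt
  simp only []
  have hInit : (PySem.Dict.ofList [("Morning", PySem.Dict.empty), ("Lunch", PySem.Dict.empty),
        ("Dinner", PySem.Dict.empty)] : PySem.Dict String (PySem.Dict String (List String))).keys.foldl
      (fun md meal => (["Mon", "Tue", "Wed", "Thu", "Fri"] : List String).foldl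
        (fun md day => md.modify meal PySem.Dict.empty (fun inner => inner.insert day [])) md)
      (PySem.Dict.ofList [("Morning", PySem.Dict.empty), ("Lunch", PySem.Dict.empty), ("Dinner", PySem.Dict.empty)])
      = pvMkMD (fun _ _ => []) := by decide
  rw [hInit]
  exact pvMain _
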